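-- pv_equiv track=rewrite | github.com/krnets/codewars-practice | 6kyu/Remember/index.py | remember
-- ===== SOURCE A (Python) =====
-- def remember(st):
--     seen = []
--     dups = []
--     for c in st:
--         if c in seen and c not in dups:
--             dups.append(c)
--         else:
--             seen.append(c)
--     return dups
-- ===== SOURCE B (Python) =====
-- def remember(st):
--     # A char belongs to the result exactly when it is at its second occurrence,
--     # i.e. it occurs exactly once in the prefix before it.
--     return [c for i, c in enumerate(st) if st.count(c, 0, i) == 1]
-- ===== Notes on version B (the rewrite author's own statement) =====
-- stated objective: simpler
-- what changed: Replaces A's stateful loop maintaining two growing lists (seen/dups) with a stateless one-line comprehension keeping each character whose preceding prefix contains it exactly once (str.count on a slice); same O(n^2) shape, but the inner scan runs in C via str.count instead of Python-level list membership.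
import Mathlib
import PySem

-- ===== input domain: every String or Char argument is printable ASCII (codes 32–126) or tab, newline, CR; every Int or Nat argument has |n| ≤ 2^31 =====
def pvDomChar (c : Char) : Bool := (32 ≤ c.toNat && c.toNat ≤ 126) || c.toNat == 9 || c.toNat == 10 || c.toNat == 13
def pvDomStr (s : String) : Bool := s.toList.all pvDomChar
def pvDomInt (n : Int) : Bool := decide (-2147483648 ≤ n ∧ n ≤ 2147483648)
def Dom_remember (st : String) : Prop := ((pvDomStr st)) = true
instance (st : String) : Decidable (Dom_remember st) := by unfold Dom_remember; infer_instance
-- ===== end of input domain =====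

-- B drops A's running seen/dups state entirely: a stateless comprehension keeping each char
-- whose prefix before it contains it exactly once (simpler, declarative; return value only).

-- ===== PORT A =====
-- one step of A's loop body: two membership tests on the running lists
def rememberStepA (sd : List Char × List Char) (c : Char) : List Char × List Char :=
  if c ∈ sd.1 ∧ c ∉ sd.2 then (sd.1, sd.2 ++ [c]) else (sd.1 ++ [c], sd.2)

def remember (st : String) : List String :=
  (st.toList.foldl rememberStepA ([], [])).2.map (fun c => String.ofList [c])

-- ===== PORT B =====
-- Source B's comprehension over enumerate; st.count(c, 0, i) is ported as (take i).count c,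
-- exact here since the needle is a single char and 0 ≤ i ≤ len(st).
def remember_alt (st : String) : List String :=
  (PySem.List.enumerate st.toList).filterMap
    (fun ic => if (st.toList.take ic.1.toNat).count ic.2 = 1 then some (String.ofList [ic.2]) else none)

-- ===== PRECONDITION & SPEC =====
def Spec_remember (st : String) (out : List String) : Prop := out = remember_alt st
instance (st : String) (out : List String) : Decidable (Spec_remember st out) := by unfold Spec_remember; infer_instance

-- ===== CLAIM (what is proved, stated in full; the proofs are below) =====
def Claim_equal_remember : Prop := ∀ (st : String), Dom_remember st → Spec_remember st (remember st)

-- ===== LEMMAS AND PROOFS =====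

-- common recursive specification: chars of l emitted when the growing prefix p holds them once
def pvEmit (p : List Char) : List Char → List Char
  | [] => []
  | c :: rest => (if p.count c = 1 then [c] else []) ++ pvEmit (p ++ [c]) rest

lemma emit_A (l : List Char) :
    ∀ (p seen dups : List Char),
      (∀ c, c ∈ seen ↔ 1 ≤ p.count c) →
      (∀ c, c ∈ dups ↔ 2 ≤ p.count c) →
      (l.foldl rememberStepA (seen, dups)).2 = dups ++ pvEmit p l := by
  induction l with
  | nil => intro p seen dups _ _; simp [pvEmit]
  | cons c rest ih =>
    intro p seen dups hseen hdups
    simp only [List.foldl_cons, pvEmit]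
    by_cases h1 : p.count c = 1
    · have hA : rememberStepA (seen, dups) c = (seen, dups ++ [c]) := by
        have hd : c ∉ dups := fun hm => by have := (hdups c).1 hm; omega
        simp [rememberStepA, (hseen c).2 (by omega), hd]
      rw [hA, ih (p ++ [c]) seen (dups ++ [c]) ?hs ?hd]
      · simp [h1]
      case hs =>
        intro x
        rw [hseen x, List.count_append]
        rcases eq_or_ne x c with rfl | hx
        · simp [h1]
        · simp [hx.symm]
      case hd =>
        intro x
        simp only [List.mem_append, List.mem_singleton, hdups x, List.count_append]
        rcases eq_or_ne x c with rfl | hx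
        · simp [h1]
        · simp [hx, hx.symm]
    · have hA : rememberStepA (seen, dups) c = (seen ++ [c], dups) := by
        by_cases h0 : p.count c = 0
        · have : c ∉ seen := fun hm => by have := (hseen c).1 hm; omega
          simp [rememberStepA, this]
        · have : c ∈ dups := (hdups c).2 (by omega)
          simp [rememberStepA, this]
      rw [hA, ih (p ++ [c]) (seen ++ [c]) dups ?hs ?hd]
      · simp [h1]
      case hs =>
        intro x
        simp only [List.mem_append, List.mem_singleton, hseen x, List.count_append]
        rcases eq_or_ne x c with rfl | hx
        · simp
        · simp [hx, hx.symm]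
      case hd =>
        intro x
        rw [hdups x, List.count_append]
        rcases eq_or_ne x c with rfl | hx
        · have h2 : p.count x ≠ 1 := h1
          simp only [List.count_singleton, beq_self_eq_true, if_true]
          omega
        · simp [hx.symm]

lemma emit_B (l : List Char) :
    ∀ (p cs : List Char), cs = p ++ l →
      (PySem.List.enumerate l (p.length : Int)).filterMap
        (fun ic => if (cs.take ic.1.toNat).count ic.2 = 1 then some ic.2 else none)
      = pvEmit p l := by
  induction l with
  | nil => intro p cs _; simp [PySem.List.enumerate_nil, pvEmit]
  | cons c rest ih =>
    intro p cs hcs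
    rw [PySem.List.enumerate_cons, List.filterMap_cons]
    have htake : cs.take ((p.length : Int)).toNat = p := by
      simp [hcs]
    have hrec := ih (p ++ [c]) cs (by simp [hcs])
    have hlen : ((p ++ [c]).length : Int) = (p.length : Int) + 1 := by simp
    rw [hlen] at hrec
    simp only [htake, pvEmit]
    by_cases h1 : p.count c = 1
    · simp [h1, hrec]
    · simp only [h1, if_false]
      exact hrec

-- ===== VERDICT (by name: the statement is the Claim_ definition above) =====
theorem remember_spec : Claim_equal_remember := by
  intro st _
  unfold Spec_remember remember remember_alt
  have hA := emit_A st.toList [] [] [] (by simp) (by simp)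
  have hB := emit_B st.toList [] st.toList (by simp)
  simp only [List.length_nil, Nat.cast_zero] at hB
  rw [hA, ← hB, List.nil_append, List.map_filterMap]
  congr 1
  funext ic
  by_cases h : (st.toList.take ic.1.toNat).count ic.2 = 1 <;> simp [h]
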